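-- pv_equiv track=rewrite | github.com/earthssu/Programmers-Algorithm | 월간코드챌린지시즌1/스타수열.py | solution
-- ===== SOURCE A (Python) =====
-- from collections import Counter
--
-- def solution(a):
--     elements = Counter(a)
--     answer = -1
--
--     for k in elements.keys():
--         if elements[k] <= answer:
--             continue
--
--         cnt = 0
--         idx = 0
--         while idx < len(a)-1:
--             if (a[idx] != k and a[idx+1] != k) or (a[idx] == a[idx+1]):
--                 idx += 1
--                 continue
--             cnt += 1
--             idx += 2
--
--         answer = max(answer, cnt)
--
--     if answer == -1:
--         return 0
--     else:
--         return answer * 2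
-- ===== SOURCE B (Python) =====
-- def solution(a):
--     # Index each value's occurrence positions once; per key, greedily pair
--     # around those occurrences only instead of re-scanning the whole list.
--     n = len(a)
--     pos = {}
--     for i, x in enumerate(a):
--         pos.setdefault(x, []).append(i)
--     best = 0
--     for k, ps in pos.items():
--         cnt = 0
--         nxt = 0  # first index not yet consumed by the scan
--         for p in ps:
--             if p > nxt:
--                 cnt += 1
--                 nxt = p + 1
--             elif p + 1 < n and a[p + 1] != k:
--                 cnt += 1
--                 nxt = p + 2
--             else:
--                 nxt = p + 1
--         best = max(best, cnt)
--     return best * 2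
-- ===== Notes on version B (the rewrite author's own statement) =====
-- stated objective: alternative
-- what changed: Instead of re-scanning the whole list once per distinct value, B builds a position index of each value's occurrences in one pass and runs the greedy pairing only over those occurrence positions with a 'next free index' pointer, removing the per-key full scan; the count<=answer pruning becomes unnecessary and is dropped.
import Mathlib
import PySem

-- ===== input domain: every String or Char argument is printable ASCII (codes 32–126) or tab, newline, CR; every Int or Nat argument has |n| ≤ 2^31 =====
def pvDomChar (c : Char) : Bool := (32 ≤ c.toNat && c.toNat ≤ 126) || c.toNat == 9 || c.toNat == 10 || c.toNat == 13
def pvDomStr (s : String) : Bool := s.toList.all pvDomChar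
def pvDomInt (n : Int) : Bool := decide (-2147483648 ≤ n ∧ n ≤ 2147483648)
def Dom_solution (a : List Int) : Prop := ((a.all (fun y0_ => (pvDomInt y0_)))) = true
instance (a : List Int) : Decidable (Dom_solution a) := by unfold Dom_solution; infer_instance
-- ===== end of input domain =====

-- B indexes each value's occurrence positions once and pairs greedily around them only,
-- instead of A's full re-scan of the whole list for every distinct value.

-- ===== PORT A =====
-- A's inner while loop: idx scans the whole list for key k.
-- a[idx] / a[idx+1] are ported with pyGetD: idx starts at 0 and stays in [0, len-1) inside the
-- loop, so both accesses are in range and the default is never used (exact).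
def solutionAWhile (a : List Int) (k : Int) (idx cnt : Int) : Int :=
  if idx < (a.length : Int) - 1 then
    if (PySem.List.pyGetD a idx 0 ≠ k ∧ PySem.List.pyGetD a (idx + 1) 0 ≠ k) ∨
        PySem.List.pyGetD a idx 0 = PySem.List.pyGetD a (idx + 1) 0 then
      solutionAWhile a k (idx + 1) cnt
    else
      solutionAWhile a k (idx + 2) (cnt + 1)
  else cnt
termination_by ((a.length : Int) - 1 - idx).toNat
decreasing_by all_goals omega

def solution (a : List Int) : Int :=
  let elements := PySem.Dict.counter a
  let answer := elements.keys.foldl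
    (fun answer k =>
      if elements.getD k 0 ≤ answer then answer
      else max answer (solutionAWhile a k 0 0)) (-1)
  if answer = -1 then 0 else answer * 2

-- ===== PORT B =====
-- B's inner loop: walk only the occurrence positions ps of k; nxt = first index the greedy
-- scan has not yet consumed.  a[p+1] is guarded by p+1 < len, so the access is in range and
-- pyGetD's default is never used (exact).
def solutionAltScan (a : List Int) (k : Int) (ps : List Int) (nxt cnt : Int) : Int :=
  match ps with
  | [] => cnt
  | p :: ps' =>
    if nxt < p then solutionAltScan a k ps' (p + 1) (cnt + 1)
    else if p + 1 < (a.length : Int) ∧ PySem.List.pyGetD a (p + 1) 0 ≠ k then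
      solutionAltScan a k ps' (p + 2) (cnt + 1)
    else solutionAltScan a k ps' (p + 1) cnt

-- pos.setdefault(x, []).append(i) is ported as Dict.modify x [] (· ++ [i]), the same update.
def solution_alt (a : List Int) : Int :=
  let pos := (PySem.List.enumerate a 0).foldl
    (fun d p => d.modify p.2 [] (· ++ [p.1])) PySem.Dict.empty
  let best := (PySem.Dict.items pos).foldl
    (fun best kps => max best (solutionAltScan a kps.1 kps.2 0 0)) 0
  best * 2

-- ===== PRECONDITION & SPEC =====
def Spec_solution (a : List Int) (out : Int) : Prop := out = solution_alt a
instance (a : List Int) (out : Int) : Decidable (Spec_solution a out) := by unfold Spec_solution; infer_instance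

-- ===== CLAIM (what is proved, stated in full; the proofs are below) =====
def Claim_equal_solution : Prop := ∀ (a : List Int), Dom_solution a → Spec_solution a (solution a)

-- ===== LEMMAS AND PROOFS =====

-- Number of pairs the greedy left-to-right scan takes for key k: the common characterisation
-- both ports are reduced to.
def starCnt (k : Int) : List Int → Int
  | x :: y :: t => if (x ≠ k ∧ y ≠ k) ∨ x = y then starCnt k (y :: t) else 1 + starCnt k t
  | _ => 0
termination_by l => l.length

-- positions (as Int) of k in l, offset by s
def occ (k : Int) (s : Nat) : List Int → List Int
  | [] => []
  | x :: t => if x = k then (s : Int) :: occ k (s + 1) t else occ k (s + 1) t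

theorem starCnt_nonneg (k : Int) (l : List Int) : 0 ≤ starCnt k l := by
  fun_induction starCnt k l with
  | case1 x y t h ih => omega
  | case2 x y t h ih => omega
  | case3 l h => simp

theorem starCnt_short (k : Int) (l : List Int) (h : l.length ≤ 1) : starCnt k l = 0 := by
  match l, h with
  | [], _ => simp [starCnt]
  | [x], _ => simp [starCnt]

theorem starCnt_le_count (k : Int) (l : List Int) : starCnt k l ≤ (l.count k : Int) := by
  fun_induction starCnt k l with
  | case1 x y t h ih =>
    simp only [List.count_cons, beq_iff_eq] at *
    split_ifs at * <;> push_cast at * <;> omega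
  | case2 x y t h ih =>
    rcases (by tauto : x = k ∨ y = k) with hk | hk <;> subst hk <;>
      simp only [List.count_cons, beq_iff_eq] <;> split_ifs <;> push_cast <;> omega
  | case3 l h => positivity

theorem starCnt_of_not_mem (k : Int) (l : List Int) (h : ∀ x ∈ l, x ≠ k) : starCnt k l = 0 := by
  fun_induction starCnt k l with
  | case1 x y t hc ih => exact ih (by intro z hz; exact h z (by simp at hz ⊢; tauto))
  | case2 x y t hc ih =>
    exact absurd (by tauto : x = k ∨ y = k)
      (by push Not; exact ⟨h x (by simp), h y (by simp)⟩)
  | case3 l hl => rfl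

theorem starCnt_run (k : Int) (u t : List Int) (hu : ∀ x ∈ u, x ≠ k) (hne : u ≠ []) :
    starCnt k (u ++ k :: t) = 1 + starCnt k t := by
  induction u with
  | nil => exact absurd rfl hne
  | cons x u' ih =>
    cases u' with
    | nil =>
      have hx : x ≠ k := hu x (by simp)
      simp [starCnt, hx]
    | cons x2 u'' =>
      have hx : x ≠ k := hu x (by simp)
      have hx2 : x2 ≠ k := hu x2 (by simp)
      rw [List.cons_append, List.cons_append, starCnt, if_pos (Or.inl ⟨hx, hx2⟩)]
      rw [← List.cons_append]
      exact ih (by intro z hz; exact hu z (by simp at hz ⊢; tauto)) (by simp)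

theorem pyGetD_at (a : List Int) (i : Nat) (hi : i < a.length) :
    PySem.List.pyGetD a (i : Int) 0 = a[i] := by
  rw [PySem.List.pyGetD_natCast, List.getD_eq_getElem _ _ hi]

theorem aWhile_eq_aux (a : List Int) (k : Int) :
    ∀ (m idx : Nat) (cnt : Int), a.length - idx ≤ m →
      solutionAWhile a k (idx : Int) cnt = cnt + starCnt k (a.drop idx) := by
  intro m
  induction m with
  | zero =>
    intro idx cnt hm
    rw [solutionAWhile, if_neg (by push_cast; omega)]
    rw [starCnt_short k _ (by simp; omega)]
    ring
  | succ m ih =>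
    intro idx cnt hm
    by_cases hc : (idx : Int) < (a.length : Int) - 1
    · have h1 : idx < a.length := by omega
      have h2 : idx + 1 < a.length := by push_cast at hc; omega
      have hd : a.drop idx = a[idx] :: a[idx + 1] :: a.drop (idx + 2) := by
        rw [List.drop_eq_getElem_cons h1, List.drop_eq_getElem_cons h2]
      have e1 : PySem.List.pyGetD a (idx : Int) 0 = a[idx] := by
        rw [PySem.List.pyGetD_natCast, List.getD_eq_getElem _ _ h1]
      have e2 : PySem.List.pyGetD a ((idx : Int) + 1) 0 = a[idx + 1] := by
        rw [show ((idx : Int) + 1) = ((idx + 1 : Nat) : Int) by push_cast; ring,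
          PySem.List.pyGetD_natCast, List.getD_eq_getElem _ _ h2]
      rw [solutionAWhile, if_pos hc, e1, e2, hd, starCnt]
      split_ifs with hcond
      · rw [show ((idx : Int) + 1) = ((idx + 1 : Nat) : Int) by push_cast; ring,
          ih (idx + 1) cnt (by omega), List.drop_eq_getElem_cons h2]
      · rw [show ((idx : Int) + 2) = ((idx + 2 : Nat) : Int) by push_cast; ring,
          ih (idx + 2) (cnt + 1) (by omega)]
        ring
    · rw [solutionAWhile, if_neg hc]
      rw [starCnt_short k _ (by simp; push_cast at hc; omega)]
      ring

theorem occ_nil (k : Int) (t : List Int) : ∀ (s : Nat), occ k s t = [] → ∀ x ∈ t, x ≠ k := by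
  induction t with
  | nil => simp
  | cons x t ih =>
    intro s h z hz
    rw [occ] at h
    split_ifs at h with hx
    intro hzk
    rcases List.mem_cons.mp hz with rfl | hzt
    · exact hx hzk
    · exact ih (s + 1) h z hzt hzk

theorem occ_decomp (k : Int) (t : List Int) :
    ∀ (s : Nat) (p : Int) (ps' : List Int), occ k s t = p :: ps' →
    ∃ j : Nat, ∃ hj : j < t.length, p = ((s + j : Nat) : Int) ∧ t[j] = k ∧
      (∀ x ∈ t.take j, x ≠ k) ∧ ps' = occ k (s + j + 1) (t.drop (j + 1)) := by
  induction t with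
  | nil => intro s p ps' h; simp [occ] at h
  | cons x t ih =>
    intro s p ps' h
    rw [occ] at h
    split_ifs at h with hx
    · refine ⟨0, by simp, ?_, ?_, by simp, ?_⟩
      · simpa using (List.cons.injEq _ _ _ _ ▸ h).1.symm
      · simpa using hx
      · simpa using ((List.cons.injEq _ _ _ _ ▸ h).2).symm
    · obtain ⟨j, hj, hp, hget, htake, hps⟩ := ih (s + 1) p ps' h
      refine ⟨j + 1, by simpa using Nat.succ_lt_succ hj, by push_cast at hp ⊢; omega, by simpa using hget, ?_, ?_⟩
      · intro z hz
        rw [List.take_succ_cons] at hz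
        rcases List.mem_cons.mp hz with rfl | hzt
        · exact hx
        · exact htake z hzt
      · rw [List.drop_succ_cons]
        rw [hps]
        congr 1
        omega

theorem altScan_eq_aux (a : List Int) (k : Int) :
    ∀ (m ofs : Nat) (cnt : Int), a.length - ofs ≤ m →
      solutionAltScan a k (occ k ofs (a.drop ofs)) (ofs : Int) cnt
        = cnt + starCnt k (a.drop ofs) := by
  intro m
  induction m with
  | zero =>
    intro ofs cnt hm
    have hd : a.drop ofs = [] := List.drop_eq_nil_of_le (by omega)
    rw [hd]
    simp [occ, solutionAltScan, starCnt]
  | succ m ih =>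
    intro ofs cnt hm
    cases hocc : occ k ofs (a.drop ofs) with
    | nil =>
      rw [starCnt_of_not_mem k _ (occ_nil k _ ofs hocc)]
      simp [solutionAltScan]
    | cons p ps' =>
      obtain ⟨j, hj, hp, hget, htake, hps⟩ := occ_decomp k _ ofs p ps' hocc
      subst hp
      have hlt : ofs + j < a.length := by
        have := List.length_drop (l := a) (i := ofs) ▸ hj; omega
      have hgetA : a[ofs + j]'hlt = k := by
        rw [← hget]; simp [List.getElem_drop]
      rw [solutionAltScan]
      rcases Nat.eq_zero_or_pos j with hj0 | hjpos
      · -- the first remaining occurrence sits at the scan pointer itself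
        subst hj0
        simp only [Nat.add_zero] at hlt hgetA hps ⊢
        rw [if_neg (by push_cast; omega)]
        have hps1 : ps' = occ k (ofs + 1) (a.drop (ofs + 1)) := by
          rw [hps, List.drop_drop]
        have hcast1 : ((ofs : Nat) : Int) + 1 = ((ofs + 1 : Nat) : Int) := by push_cast; ring
        by_cases hlen : ofs + 1 < a.length
        · have e2 : PySem.List.pyGetD a ((ofs : Int) + 1) 0 = a[ofs + 1] := by
            rw [hcast1]; exact pyGetD_at a (ofs + 1) hlen
          have hd2 : a.drop ofs = k :: a[ofs + 1] :: a.drop (ofs + 2) := by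
            rw [List.drop_eq_getElem_cons (show ofs < a.length by omega),
              List.drop_eq_getElem_cons hlen, hgetA]
          by_cases hy : a[ofs + 1] = k
          · -- next element is k as well: the (k,k) pair is skipped
            rw [if_neg (by rw [e2]; push Not; intro _; simpa using hy)]
            rw [hcast1, hps1, ih (ofs + 1) cnt (by omega)]
            have hthis : a.drop (ofs + 1) = k :: a.drop (ofs + 2) := by
              rw [List.drop_eq_getElem_cons hlen, hy]
            rw [hthis, hd2, starCnt, if_pos (Or.inr hy.symm), hy]
          · -- pair (k, y) is taken
            rw [if_pos ⟨by push_cast; omega, by rw [e2]; exact hy⟩]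
            have hps2 : ps' = occ k (ofs + 2) (a.drop (ofs + 2)) := by
              rw [hps1, List.drop_eq_getElem_cons hlen, occ, if_neg hy,
                show ofs + 1 + 1 = ofs + 2 by omega]
            rw [show ((ofs : Nat) : Int) + 2 = ((ofs + 2 : Nat) : Int) by push_cast; ring]
            rw [hps2, ih (ofs + 2) (cnt + 1) (by omega), hd2, starCnt,
              if_neg (by push Not; exact ⟨fun h => absurd rfl h, fun h => hy h.symm⟩)]
            ring
        · -- the k is the last element: nothing left to pair with
          rw [if_neg (by push Not; intro h; exfalso; push_cast at h; omega)]
          rw [hcast1, hps1, ih (ofs + 1) cnt (by omega)]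
          rw [starCnt_short k (a.drop ofs) (by simp; omega),
            starCnt_short k (a.drop (ofs + 1)) (by simp; omega)]
      · -- a non-k run precedes the occurrence: its last element pairs with the k
        rw [if_pos (by push_cast; omega)]
        have hps2 : ps' = occ k (ofs + j + 1) (a.drop (ofs + j + 1)) := by
          rw [hps, List.drop_drop, show ofs + (j + 1) = ofs + j + 1 by omega]
        rw [show ((ofs + j : Nat) : Int) + 1 = ((ofs + j + 1 : Nat) : Int) by push_cast; ring]
        rw [hps2, ih (ofs + j + 1) (cnt + 1) (by omega)]
        have hsplit : a.drop ofs = (a.drop ofs).take j ++ k :: a.drop (ofs + j + 1) := by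
          conv_lhs => rw [← List.take_append_drop j (a.drop ofs)]
          rw [List.drop_eq_getElem_cons hj, hget, List.drop_drop,
            show ofs + (j + 1) = ofs + j + 1 by omega]
        conv_rhs => rw [hsplit]
        rw [starCnt_run k _ _ htake (by simp [List.take_eq_nil_iff]; omega)]
        ring

theorem getD_posfold (k : Int) (l : List Int) :
    ∀ (s : Nat) (d : PySem.Dict Int (List Int)),
      ((PySem.List.enumerate l (s : Int)).foldl
        (fun d p => d.modify p.2 [] (· ++ [p.1])) d).getD k []
        = d.getD k [] ++ occ k s l := by
  induction l with
  | nil => intro s d; simp [occ]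
  | cons x t ih =>
    intro s d
    rw [PySem.List.enumerate_cons, List.foldl_cons,
      show ((s : Nat) : Int) + 1 = ((s + 1 : Nat) : Int) by push_cast; ring,
      ih (s + 1) (d.modify x [] (· ++ [(s : Int)])),
      PySem.Dict.getD_modify, occ]
    split_ifs with h1 h2 h2
    · simp [h1]
    · exact absurd h1.symm h2
    · exact absurd h2.symm h1
    · rfl

theorem solution_eq_fold (a : List Int) :
    solution a =
      (if (PySem.Set.ofList a).foldl (fun ans k => max ans (starCnt k a)) (-1) = -1 then 0
       else (PySem.Set.ofList a).foldl (fun ans k => max ans (starCnt k a)) (-1) * 2) := by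
  have hstep : ∀ (acc : Int), ∀ kk ∈ PySem.Set.ofList a,
      (if (PySem.Dict.counter a).getD kk 0 ≤ acc then acc
       else max acc (solutionAWhile a kk 0 0)) = max acc (starCnt kk a) := by
    intro acc kk _
    have hw : solutionAWhile a kk 0 0 = starCnt kk a := by
      have := aWhile_eq_aux a kk a.length 0 0 (by omega)
      simpa using this
    rw [PySem.Dict.getD_counter, hw]
    split_ifs with h
    · exact (max_eq_left ((starCnt_le_count kk a).trans h)).symm
    · rfl
  simp only [solution, PySem.Dict.keys_counter]
  rw [PySem.List.foldl_congr_mem _ _ _ _ hstep]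

theorem solution_alt_eq_fold (a : List Int) :
    solution_alt a =
      (PySem.Set.ofList a).foldl (fun ans k => max ans (starCnt k a)) 0 * 2 := by
  simp only [solution_alt]
  have hnodup : ((PySem.List.enumerate a 0).foldl
      (fun d p => d.modify p.2 [] (· ++ [p.1])) PySem.Dict.empty).keys.Nodup :=
    PySem.Dict.nodup_keys_foldl_modify_key _ _ _ _ _ (by simp [PySem.Dict.keys_empty])
  have hkeys : ((PySem.List.enumerate a 0).foldl
      (fun d p => d.modify p.2 [] (· ++ [p.1])) PySem.Dict.empty).keys
      = PySem.Set.ofList a := by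
    rw [PySem.Dict.keys_foldl_modify_key, PySem.Dict.keys_empty,
      PySem.List.map_snd_enumerate, PySem.Set.update_nil_left]
  rw [PySem.Dict.items_eq_map_keys _ hnodup [], hkeys, List.foldl_map]
  congr 1
  apply PySem.List.foldl_congr_mem
  intro acc kk _
  have hget : ((PySem.List.enumerate a 0).foldl
      (fun d p => d.modify p.2 [] (· ++ [p.1])) PySem.Dict.empty).getD kk []
      = occ kk 0 a := by
    have := getD_posfold kk a 0 PySem.Dict.empty
    simpa [PySem.Dict.getD_empty] using this
  have hscan : solutionAltScan a kk (occ kk 0 a) 0 0 = starCnt kk a := by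
    have := altScan_eq_aux a kk a.length 0 0 (by omega)
    simpa using this
  rw [hget, hscan]

theorem solution_eq_alt (a : List Int) : solution a = solution_alt a := by
  rw [solution_eq_fold, solution_alt_eq_fold]
  cases h : PySem.Set.ofList a with
  | nil => simp
  | cons k0 ks' =>
    rw [List.foldl_cons, List.foldl_cons,
      max_eq_right (by have := starCnt_nonneg k0 a; omega : (-1 : Int) ≤ starCnt k0 a),
      max_eq_right (starCnt_nonneg k0 a)]
    have h0 := (PySem.List.le_foldl_max_int ks' (fun k => starCnt k a) (starCnt k0 a)).1
    have hg := starCnt_nonneg k0 a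
    rw [if_neg (by omega)]

-- ===== VERDICT (by name: the statement is the Claim_ definition above) =====
theorem solution_spec : Claim_equal_solution := by
  intro a _
  show solution a = solution_alt a
  exact solution_eq_alt a
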